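-- pv_equiv track=rewrite | github.com/WillanHurtado-Dev-Pent/recursion_py | PRACTICO RECURSIVIDAD.py | CantDigImparesAntesPar
-- ===== SOURCE A (Python) =====
-- def CantDigImparesAntesPar(nro):
--     if nro >= 10:
--         dig_a = nro % 10
--         nro = nro // 10
--         dig_b = nro % 10
--         if dig_a % 2 != 0 and dig_b % 2 == 0:
--             return CantDigImparesAntesPar(nro) + 1
--         else:
--             return CantDigImparesAntesPar(nro)
--     else:
--         return 0
-- ===== SOURCE B (Python) =====
-- def CantDigImparesAntesPar(nro):
--     if nro < 10:
--         return 0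
--     digs = []
--     while nro > 0:
--         digs.append(nro % 10)
--         nro //= 10
--     return sum(1 for a, b in zip(digs, digs[1:]) if a % 2 == 1 and b % 2 == 0)
-- ===== Notes on version B (the rewrite author's own statement) =====
-- stated objective: alternative
-- what changed: Two-phase rewrite: first build the list of decimal digits (least significant first), then count adjacent (odd, even) pairs with a zip scan, instead of A's single recursion that inspects two digits per step.
import Mathlib
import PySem

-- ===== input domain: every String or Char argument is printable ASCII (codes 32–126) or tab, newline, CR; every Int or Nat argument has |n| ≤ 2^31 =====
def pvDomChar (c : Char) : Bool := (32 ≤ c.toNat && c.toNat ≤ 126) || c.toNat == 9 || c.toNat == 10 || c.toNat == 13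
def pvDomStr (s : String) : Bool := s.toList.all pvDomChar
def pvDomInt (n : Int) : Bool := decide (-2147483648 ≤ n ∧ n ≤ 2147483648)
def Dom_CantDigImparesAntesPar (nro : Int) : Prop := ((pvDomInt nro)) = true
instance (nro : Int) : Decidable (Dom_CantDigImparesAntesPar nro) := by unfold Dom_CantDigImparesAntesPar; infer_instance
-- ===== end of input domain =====

-- B rebuilds the answer in two phases — extract the decimal digit list, then count adjacent (odd, even) pairs by a zip scan — instead of A's single recursion; return values proved equal for all Int inputs.

-- termination measure fact, cited by both ports' recursions
theorem pvFloordiv10_toNat_lt (n : Int) (h : 0 < n) :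
    (PySem.Int.floordiv n 10).toNat < n.toNat := by
  rw [PySem.Int.floordiv_eq_ediv_of_pos (by omega)]
  omega

-- ===== PORT A =====
def CantDigImparesAntesPar (nro : Int) : Int :=
  if 10 ≤ nro then
    let dig_a := PySem.Int.mod nro 10
    let nro' := PySem.Int.floordiv nro 10
    let dig_b := PySem.Int.mod nro' 10
    if PySem.Int.mod dig_a 2 ≠ 0 ∧ PySem.Int.mod dig_b 2 = 0 then
      CantDigImparesAntesPar nro' + 1
    else
      CantDigImparesAntesPar nro'
  else
    0
termination_by nro.toNat
decreasing_by all_goals exact pvFloordiv10_toNat_lt nro (by omega)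

-- ===== PORT B =====
-- the digit-extraction while loop of Source B: digits of nro, least significant first
def pvDigits (n : Int) : List Int :=
  if 0 < n then PySem.Int.mod n 10 :: pvDigits (PySem.Int.floordiv n 10) else []
termination_by n.toNat
decreasing_by exact pvFloordiv10_toNat_lt n (by omega)

-- sum(1 for a, b in zip(digs, digs[1:]) if a % 2 == 1 and b % 2 == 0)
def pvCountPairs (l : List Int) : Int :=
  ((l.zip (l.drop 1)).map
    (fun p => if PySem.Int.mod p.1 2 = 1 ∧ PySem.Int.mod p.2 2 = 0 then (1 : Int) else 0)).sum

def CantDigImparesAntesPar_alt (nro : Int) : Int :=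
  if nro < 10 then 0 else pvCountPairs (pvDigits nro)

-- ===== PRECONDITION & SPEC =====
def Spec_CantDigImparesAntesPar (nro : Int) (out : Int) : Prop := out = CantDigImparesAntesPar_alt nro
instance (nro : Int) (out : Int) : Decidable (Spec_CantDigImparesAntesPar nro out) := by unfold Spec_CantDigImparesAntesPar; infer_instance

-- ===== CLAIM =====
def Claim_equal_CantDigImparesAntesPar : Prop := ∀ (nro : Int), Dom_CantDigImparesAntesPar nro → Spec_CantDigImparesAntesPar nro (CantDigImparesAntesPar nro)

-- ===== LEMMAS AND PROOFS =====
theorem pvCountPairs_cons_cons (a b : Int) (r : List Int) :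
    pvCountPairs (a :: b :: r) =
      (if PySem.Int.mod a 2 = 1 ∧ PySem.Int.mod b 2 = 0 then (1 : Int) else 0)
        + pvCountPairs (b :: r) := by
  simp [pvCountPairs]

theorem pvCantDig_eq_countPairs (n : Int) :
    CantDigImparesAntesPar n = pvCountPairs (pvDigits n) := by
  fun_induction CantDigImparesAntesPar n with
  | case1 n h dig_a n' dig_b hc ih =>
      have hmn : PySem.Int.mod n 10 = n % 10 := PySem.Int.mod_eq_emod_of_pos (by omega)
      have hdn : PySem.Int.floordiv n 10 = n / 10 := PySem.Int.floordiv_eq_ediv_of_pos (by omega)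
      have hn' : 0 < n' := by simp only [n', hdn]; omega
      have hD : pvDigits n = dig_a :: dig_b :: pvDigits (PySem.Int.floordiv n' 10) := by
        rw [pvDigits, if_pos (by omega : (0:Int) < n)]
        rw [pvDigits, if_pos hn']
      have ih' : CantDigImparesAntesPar n' = pvCountPairs (dig_b :: pvDigits (PySem.Int.floordiv n' 10)) := by
        rw [ih, pvDigits, if_pos hn']
      rw [hD, pvCountPairs_cons_cons, ← ih']
      have ha : 0 ≤ dig_a := by simp only [dig_a, hmn]; omega
      have hma : PySem.Int.mod dig_a 2 = dig_a % 2 := PySem.Int.mod_eq_emod_of_pos (by omega)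
      have h1 : PySem.Int.mod dig_a 2 = 1 := by rw [hma]; rw [hma] at hc; omega
      rw [if_pos ⟨h1, hc.2⟩]; ring
  | case2 n h dig_a n' dig_b hc ih =>
      have hmn : PySem.Int.mod n 10 = n % 10 := PySem.Int.mod_eq_emod_of_pos (by omega)
      have hdn : PySem.Int.floordiv n 10 = n / 10 := PySem.Int.floordiv_eq_ediv_of_pos (by omega)
      have hn' : 0 < n' := by simp only [n', hdn]; omega
      have hD : pvDigits n = dig_a :: dig_b :: pvDigits (PySem.Int.floordiv n' 10) := by
        rw [pvDigits, if_pos (by omega : (0:Int) < n)]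
        rw [pvDigits, if_pos hn']
      have ih' : CantDigImparesAntesPar n' = pvCountPairs (dig_b :: pvDigits (PySem.Int.floordiv n' 10)) := by
        rw [ih, pvDigits, if_pos hn']
      rw [hD, pvCountPairs_cons_cons, ← ih']
      have hma : PySem.Int.mod dig_a 2 = dig_a % 2 := PySem.Int.mod_eq_emod_of_pos (by omega)
      have ha : 0 ≤ dig_a := by simp only [dig_a, hmn]; omega
      have hno : ¬ (PySem.Int.mod dig_a 2 = 1 ∧ PySem.Int.mod dig_b 2 = 0) := by
        intro ⟨h1, h2⟩
        exact hc ⟨by rw [hma] at h1 ⊢; omega, h2⟩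
      rw [if_neg hno]; ring
  | case3 n h =>
      by_cases hp : 0 < n
      · have hdn : PySem.Int.floordiv n 10 = n / 10 := PySem.Int.floordiv_eq_ediv_of_pos (by omega)
        rw [pvDigits, if_pos hp, pvDigits, if_neg (by rw [hdn]; omega)]
        simp [pvCountPairs]
      · rw [pvDigits, if_neg hp]
        simp [pvCountPairs]

-- ===== VERDICT =====
theorem CantDigImparesAntesPar_spec : Claim_equal_CantDigImparesAntesPar := by
  intro nro _
  unfold Spec_CantDigImparesAntesPar CantDigImparesAntesPar_alt
  split_ifs with h
  · rw [CantDigImparesAntesPar]; simp [show ¬ (10 ≤ nro) by omega]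
  · exact pvCantDig_eq_countPairs nro
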